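-- pv_equiv track=rewrite | github.com/tareksanger/COMP3007 | recursion/recusion_with_strings.py | split_string_at_underscore
-- ===== SOURCE A (Python) =====
-- def index_of_left_most_underscore(word):
--     if not word:
--         return 0
--     if word[0] != '_':
--         return 1 + index_of_left_most_underscore(word[1:])
--     else:
--         word = word[0]
--         return index_of_left_most_underscore(word[1:])
--
-- def split_string_at_underscore(word , split_words = None):
--     if split_words is None:
--         split_words = []
--     if not word:
--         return split_words
--     else:
--         split_words.append(word[:index_of_left_most_underscore(word)])
--         return split_string_at_underscore(word[index_of_left_most_underscore(word) + 1:], split_words)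
-- ===== SOURCE B (Python) =====
-- def split_string_at_underscore(word, split_words=None):
--     if split_words is None:
--         split_words = []
--     segment = ""
--     for ch in word:
--         if ch == '_':
--             split_words.append(segment)
--             segment = ""
--         else:
--             segment += ch
--     if segment:
--         split_words.append(segment)
--     return split_words
-- ===== Notes on version B (the rewrite author's own statement) =====
-- stated objective: faster
-- what changed: Replaces the double-recursive scan (recursive first-underscore search re-run twice per segment, plus repeated string slicing) by a single iterative left-to-right pass that accumulates a running segment and appends it on each underscore, appending the final segment only if non-empty.
import Mathlib
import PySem

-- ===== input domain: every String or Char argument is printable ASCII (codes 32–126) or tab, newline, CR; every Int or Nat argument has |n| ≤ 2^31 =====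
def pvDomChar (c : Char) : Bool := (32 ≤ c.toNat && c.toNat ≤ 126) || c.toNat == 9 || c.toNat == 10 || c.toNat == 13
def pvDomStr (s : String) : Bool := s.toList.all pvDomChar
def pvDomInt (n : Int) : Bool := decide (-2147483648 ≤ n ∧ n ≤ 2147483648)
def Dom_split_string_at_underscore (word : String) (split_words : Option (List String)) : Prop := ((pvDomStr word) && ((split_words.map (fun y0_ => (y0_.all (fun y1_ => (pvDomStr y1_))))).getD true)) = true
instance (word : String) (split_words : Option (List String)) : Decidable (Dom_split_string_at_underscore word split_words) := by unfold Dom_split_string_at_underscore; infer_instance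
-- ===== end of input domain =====

-- B replaces A's double-recursive scan (recursive first-underscore search called twice per
-- segment plus slicing) by one iterative pass with a running segment; return value equal on all
-- inputs. (Both Pythons also mutate a caller-supplied split_words list the same way; the
-- equivalence proved here is about the return value.)


-- ===== PORT A =====
-- index_of_left_most_underscore, on the character list of the word.  All slice indices that
-- occur (1, i, i+1) are non-negative, so Python's slices are exactly List.take/List.drop here.
def idxA : List Char → Nat
  | [] => 0
  | c :: rest =>
    if c ≠ '_' then 1 + idxA rest
    -- Python: word = word[0]; return index_of_left_most_underscore(word[1:])  — word[1:] = ""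
    else idxA (([c]).drop 1)

-- the recursion of split_string_at_underscore, after the `split_words is None` default is resolved
def splitA (l : List Char) (split_words : List String) : List String :=
  if h : l = [] then split_words
  else
    splitA (l.drop (idxA l + 1)) (split_words ++ [String.ofList (l.take (idxA l))])
termination_by l.length
decreasing_by
  cases l with
  | nil => exact absurd rfl h
  | cons c rest => simp

def split_string_at_underscore (word : String) (split_words : Option (List String)) : List String :=
  splitA word.toList (split_words.getD [])

-- ===== PORT B =====
-- the for-loop of B: running `segment`, appended on '_', final segment appended iff non-empty
def altGo : List Char → String → List String → List String
  | [], seg, acc => if seg ≠ "" then acc ++ [seg] else acc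
  | c :: rest, seg, acc =>
    if c = '_' then altGo rest "" (acc ++ [seg])
    else altGo rest (seg.push c) acc

def split_string_at_underscore_alt (word : String) (split_words : Option (List String)) : List String :=
  altGo word.toList "" (split_words.getD [])

-- ===== PRECONDITION & SPEC =====
def Spec_split_string_at_underscore (word : String) (split_words : Option (List String)) (out : List String) : Prop := out = split_string_at_underscore_alt word split_words
instance (word : String) (split_words : Option (List String)) (out : List String) : Decidable (Spec_split_string_at_underscore word split_words out) := by unfold Spec_split_string_at_underscore; infer_instance

-- ===== CLAIM (what is proved, stated in full; the proofs are below) =====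
def Claim_equal_split_string_at_underscore : Prop := ∀ (word : String) (split_words : Option (List String)), Dom_split_string_at_underscore word split_words → Spec_split_string_at_underscore word split_words (split_string_at_underscore word split_words)

-- ===== LEMMAS AND PROOFS =====

-- A's helper is the index of the first underscore (= length when there is none)
theorem idxA_eq_idxOf (l : List Char) : idxA l = l.idxOf '_' := by
  induction l with
  | nil => simp [idxA]
  | cons c rest ih =>
    by_cases hc : c = '_'
    · simp [idxA, hc]
    · simp [idxA, hc, ih]; omega

-- one full segment-step of B's loop, with the pending segment made explicit
theorem altGo_step (l : List Char) (seg : String) (acc : List String) :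
    altGo l seg acc =
      if '_' ∈ l then
        altGo (l.drop (l.idxOf '_' + 1)) "" (acc ++ [String.ofList (seg.toList ++ l.take (l.idxOf '_'))])
      else if seg.toList ++ l = [] then acc else acc ++ [String.ofList (seg.toList ++ l)] := by
  induction l generalizing seg acc with
  | nil =>
    simp only [altGo, List.not_mem_nil, if_neg (fun h : False => h.elim), List.append_nil]
    by_cases h : seg = ""
    · subst h; simp
    · have hne : seg.toList ≠ [] := by
        intro hc
        exact h (by simpa using congrArg String.ofList hc)
      simp [h, hne]
  | cons c rest ih =>
    by_cases hc : c = '_'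
    · subst hc
      simp [altGo]
    · have hmem : ('_' ∈ c :: rest) ↔ ('_' ∈ rest) := by simp [Ne.symm hc]
      have hidx : (c :: rest).idxOf '_' = rest.idxOf '_' + 1 := by
        simp [hc]
      simp only [altGo, if_neg hc, ih]
      by_cases hm : '_' ∈ rest
      · simp [hm, hmem, hidx, String.toList_push, List.append_assoc, List.take_succ_cons]
      · simp [hm, hmem, String.toList_push, List.append_assoc]

theorem splitA_eq_altGo_aux : ∀ (n : Nat) (l : List Char) (acc : List String),
    l.length ≤ n → splitA l acc = altGo l "" acc := by
  intro n
  induction n with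
  | zero =>
    intro l acc h
    have hl : l = [] := List.eq_nil_of_length_eq_zero (Nat.le_zero.mp h)
    subst hl
    simp [splitA, altGo]
  | succ n ih =>
    intro l acc h
    cases l with
    | nil => simp [splitA, altGo]
    | cons c rest =>
      rw [splitA, dif_neg (by simp), altGo_step, idxA_eq_idxOf]
      by_cases hm : '_' ∈ c :: rest
      · rw [if_pos hm]
        have hlen : ((c :: rest).drop ((c :: rest).idxOf '_' + 1)).length ≤ n := by
          simp at h ⊢; omega
        simpa using ih _ _ hlen
      · rw [if_neg hm]
        have hidx : (c :: rest).idxOf '_' = (c :: rest).length := List.idxOf_eq_length_iff.mpr hm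
        rw [hidx]
        simp [splitA]

theorem splitA_eq_altGo (l : List Char) (acc : List String) :
    splitA l acc = altGo l "" acc :=
  splitA_eq_altGo_aux l.length l acc (Nat.le_refl _)

-- ===== VERDICT (by name: the statement is the Claim_ definition above) =====
theorem split_string_at_underscore_spec : Claim_equal_split_string_at_underscore := by
  intro word split_words _
  unfold Spec_split_string_at_underscore split_string_at_underscore split_string_at_underscore_alt
  exact splitA_eq_altGo _ _
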